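-- pv_equiv track=rewrite | github.com/HemanathJack/Django_project | Application/py_files/iot_ta/iot_testcase.py | get_simulator_type
-- ===== SOURCE A (Python) =====
-- def get_simulator_type(simulator):
-- 	"""Analyse simulator ID from defined dict and returns elevator or escalator
--
-- 	Args:
-- 		simulator (str): Simulator ID to verify.
-- 	"""
-- 	_type = {
-- 		'elevator' : ['SIMU01', 'SIMU06', 'SIMU74', 'SIMU144', 'SIMU153', 'SIMU358', 'SIMU376'],
-- 		'escalator' : ['SIMU232', 'SIMU362']
-- 	}
-- 	for type, simus in _type.items():
-- 		if simulator in simus: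
-- 			return type
-- ===== SOURCE B (Python) =====
-- def get_simulator_type(simulator):
-- 	"""Analyse simulator ID from defined dict and returns elevator or escalator
--
-- 	Args:
-- 		simulator (str): Simulator ID to verify.
-- 	"""
-- 	if not simulator.startswith('SIMU'):
-- 		return None
-- 	suffix = simulator[4:]
-- 	if suffix in ('232', '362'):
-- 		return 'escalator'
-- 	if suffix in ('01', '06', '74', '144', '153', '358', '376'):
-- 		return 'elevator'
-- 	return None
-- ===== Notes on version B (the rewrite author's own statement) =====
-- stated objective: alternative
-- what changed: B decomposes the ID structurally: it checks the 'SIMU' prefix once, slices off the numeric suffix, and dispatches on that suffix (escalator numbers first, then elevator numbers), instead of A's loop over a type->list dict with a membership scan per category.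
import Mathlib
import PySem

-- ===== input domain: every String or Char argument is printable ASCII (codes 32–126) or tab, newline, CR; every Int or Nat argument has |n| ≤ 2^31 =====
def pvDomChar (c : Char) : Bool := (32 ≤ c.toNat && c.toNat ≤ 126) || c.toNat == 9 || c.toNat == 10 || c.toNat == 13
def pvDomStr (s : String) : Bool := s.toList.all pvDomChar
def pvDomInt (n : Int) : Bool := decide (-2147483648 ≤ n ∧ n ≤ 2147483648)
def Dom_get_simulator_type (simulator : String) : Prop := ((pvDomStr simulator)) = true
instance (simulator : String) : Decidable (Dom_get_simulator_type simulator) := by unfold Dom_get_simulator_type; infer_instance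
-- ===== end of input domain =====

-- B classifies the ID structurally (check the 'SIMU' prefix, slice off the suffix, dispatch on the
-- suffix) instead of A's loop over a type->list dict with a membership scan per category (alternative).

-- ===== PORT A =====
-- 'for type, simus in _type.items(): if simulator in simus: return type'
def getSimTypeLoop (items : List (String × List String)) (simulator : String) : Option String :=
  match items with
  | [] => none
  | (t, simus) :: rest =>
      if simulator ∈ simus then some t else getSimTypeLoop rest simulator

def get_simulator_type (simulator : String) : Option String :=
  getSimTypeLoop
    [("elevator", ["SIMU01", "SIMU06", "SIMU74", "SIMU144", "SIMU153", "SIMU358", "SIMU376"]),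
     ("escalator", ["SIMU232", "SIMU362"])]
    simulator

-- ===== PORT B =====
def get_simulator_type_alt (simulator : String) : Option String :=
  if !(PySem.Str.startswith simulator "SIMU") then
    none
  else
    let suffix := PySem.Str.slice simulator (some 4) none
    if suffix ∈ ["232", "362"] then some "escalator"
    else if suffix ∈ ["01", "06", "74", "144", "153", "358", "376"] then some "elevator"
    else none

-- ===== PRECONDITION & SPEC =====
def Spec_get_simulator_type (simulator : String) (out : Option String) : Prop := out = get_simulator_type_alt simulator
instance (simulator : String) (out : Option String) : Decidable (Spec_get_simulator_type simulator out) := by unfold Spec_get_simulator_type; infer_instance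

-- ===== CLAIM (what is proved, stated in full; the proofs are below) =====
def Claim_equal_get_simulator_type : Prop := ∀ (simulator : String), Dom_get_simulator_type simulator → Spec_get_simulator_type simulator (get_simulator_type simulator)

-- ===== LEMMAS AND PROOFS =====

-- If s starts with "SIMU" and its suffix s[4:] equals t, then s = "SIMU" ++ t (on code points).
theorem pv_prefix_suffix (s : String) (t : List Char)
    (hpre : PySem.Str.startswith s "SIMU" = true)
    (hsuf : (PySem.Str.slice s (some 4) none).toList = t) :
    s.toList = "SIMU".toList ++ t := by
  simp only [PySem.Str.startswith_eq, PySem.Chars.startswith_iff] at hpre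
  obtain ⟨r, hr⟩ := hpre
  have hdrop : (PySem.Str.slice s (some 4) none).toList = s.toList.drop 4 := by
    simp [PySem.Str.toList_slice, PySem.Chars.slice_eq_listSlice,
      PySem.List.slice_from (xs := s.toList) (a := 4) (by norm_num)]
  rw [hdrop] at hsuf
  rw [← hr, ← hsuf, ← hr]
  simp

-- On any string that is none of the nine known IDs, B returns none.
theorem pv_alt_none (s : String)
    (h : s ∉ (["SIMU01", "SIMU06", "SIMU74", "SIMU144", "SIMU153", "SIMU358", "SIMU376",
               "SIMU232", "SIMU362"] : List String)) :
    get_simulator_type_alt s = none := by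
  unfold get_simulator_type_alt
  by_cases h0 : PySem.Str.startswith s "SIMU" = true
  · simp only [h0, Bool.not_true, Bool.false_eq_true, if_false]
    split_ifs with h1 h2
    · exfalso
      simp only [List.mem_cons, List.not_mem_nil, or_false] at h1
      rcases h1 with h1 | h1
      · have hs : s = "SIMU232" := String.toList_injective
          (by rw [pv_prefix_suffix s ("232".toList) h0 (by rw [h1])]; decide)
        exact h (by rw [hs]; decide)
      · have hs : s = "SIMU362" := String.toList_injective
          (by rw [pv_prefix_suffix s ("362".toList) h0 (by rw [h1])]; decide)
        exact h (by rw [hs]; decide)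
    · exfalso
      simp only [List.mem_cons, List.not_mem_nil, or_false] at h2
      rcases h2 with h2 | h2 | h2 | h2 | h2 | h2 | h2
      · have hs : s = "SIMU01" := String.toList_injective
          (by rw [pv_prefix_suffix s ("01".toList) h0 (by rw [h2])]; decide)
        exact h (by rw [hs]; decide)
      · have hs : s = "SIMU06" := String.toList_injective
          (by rw [pv_prefix_suffix s ("06".toList) h0 (by rw [h2])]; decide)
        exact h (by rw [hs]; decide)
      · have hs : s = "SIMU74" := String.toList_injective
          (by rw [pv_prefix_suffix s ("74".toList) h0 (by rw [h2])]; decide)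
        exact h (by rw [hs]; decide)
      · have hs : s = "SIMU144" := String.toList_injective
          (by rw [pv_prefix_suffix s ("144".toList) h0 (by rw [h2])]; decide)
        exact h (by rw [hs]; decide)
      · have hs : s = "SIMU153" := String.toList_injective
          (by rw [pv_prefix_suffix s ("153".toList) h0 (by rw [h2])]; decide)
        exact h (by rw [hs]; decide)
      · have hs : s = "SIMU358" := String.toList_injective
          (by rw [pv_prefix_suffix s ("358".toList) h0 (by rw [h2])]; decide)
        exact h (by rw [hs]; decide)
      · have hs : s = "SIMU376" := String.toList_injective
          (by rw [pv_prefix_suffix s ("376".toList) h0 (by rw [h2])]; decide)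
        exact h (by rw [hs]; decide)
    · rfl
  · simp only [Bool.not_eq_true] at h0
    rw [h0]
    rfl

-- ===== VERDICT (by name: the statement is the Claim_ definition above) =====
set_option maxHeartbeats 1000000 in
theorem get_simulator_type_spec : Claim_equal_get_simulator_type := by
  intro s _
  show get_simulator_type s = get_simulator_type_alt s
  by_cases h : s ∈ (["SIMU01", "SIMU06", "SIMU74", "SIMU144", "SIMU153", "SIMU358", "SIMU376",
                     "SIMU232", "SIMU362"] : List String)
  · simp only [List.mem_cons, List.not_mem_nil, or_false] at h
    rcases h with rfl | rfl | rfl | rfl | rfl | rfl | rfl | rfl | rfl <;> decide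
  · rw [pv_alt_none s h]
    have h' := h
    simp only [List.mem_cons, List.not_mem_nil, or_false, not_or] at h'
    obtain ⟨h1, h2, h3, h4, h5, h6, h7, h8, h9⟩ := h'
    simp [get_simulator_type, getSimTypeLoop, h1, h2, h3, h4, h5, h6, h7, h8, h9]
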